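-- pv_equiv track=rewrite | github.com/Giantryan484/Guitar-TAB-Generator | Python/Dataset Generation/midiToTensor.py | get_notes_in_32nd_period
-- ===== SOURCE A (Python) =====
-- def get_notes_in_32nd_period(note_dict, start_time, end_time):
--     notes_playing = set()
--
--     for note_info in note_dict.values():
--         note, (note_start, note_end) = note_info
--
--         # if note beginning is in this period, mark it.
--         if note_start == start_time:  # and note_start <= end_time:
--             notes_playing.add(note)
--
--     # convert into a one-hot encoded array for notes 40 to 88
--     one_hot_array = [0] * (88 - 40 + 1)
--     for note in notes_playing:
--         if 40 <= note <= 88: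
--             one_hot_array[note - 40] = 1
--
--     return one_hot_array
-- ===== SOURCE B (Python) =====
-- def get_notes_in_32nd_period(note_dict, start_time, end_time):
--     # Build the one-hot vector index-wise: slot i is 1 iff some note equal to
--     # 40+i starts exactly at start_time.
--     return [
--         1 if any(note == 40 + i and s == start_time
--                  for note, (s, e) in note_dict.values()) else 0
--         for i in range(49)
--     ]
-- ===== Notes on version B (the rewrite author's own statement) =====
-- stated objective: alternative
-- what changed: Replaces A's two-pass collect-into-a-set-then-scatter-writes structure by a direct index-wise construction: each of the 49 slots is computed independently with an any() membership test over the dict values, so no intermediate set and no in-place array writes exist.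
import Mathlib
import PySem

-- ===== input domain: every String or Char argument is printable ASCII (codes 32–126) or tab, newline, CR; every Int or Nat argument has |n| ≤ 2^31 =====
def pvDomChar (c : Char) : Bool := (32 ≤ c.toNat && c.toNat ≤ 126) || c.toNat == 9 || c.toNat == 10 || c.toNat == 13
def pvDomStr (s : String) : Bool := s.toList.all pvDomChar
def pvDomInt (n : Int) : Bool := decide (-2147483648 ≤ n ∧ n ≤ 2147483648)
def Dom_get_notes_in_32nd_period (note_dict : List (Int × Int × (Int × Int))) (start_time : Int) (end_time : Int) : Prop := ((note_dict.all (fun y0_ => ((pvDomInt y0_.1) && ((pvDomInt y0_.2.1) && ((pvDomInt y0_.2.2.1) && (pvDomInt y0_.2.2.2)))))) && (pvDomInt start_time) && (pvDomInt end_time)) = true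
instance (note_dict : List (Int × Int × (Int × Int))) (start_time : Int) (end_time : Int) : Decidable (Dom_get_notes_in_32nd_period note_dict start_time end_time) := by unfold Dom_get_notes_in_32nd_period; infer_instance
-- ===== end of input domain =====

-- B builds the 49-slot one-hot vector index-wise with a per-slot any() scan,
-- dropping A's intermediate set and its scatter writes (objective: alternative).

-- ===== PORT A =====
-- literal transliteration: collect notes starting at start_time into a set,
-- then scatter 1s into a zero array (set iteration order is irrelevant here:
-- each element only writes a 1 at its own index).
def get_notes_in_32nd_period (note_dict : List (Int × Int × (Int × Int))) (start_time : Int) (end_time : Int) : List Int :=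
  let notes_playing : PySem.Set Int :=
    note_dict.foldl
      (fun s kv => if kv.2.2.1 = start_time then PySem.Set.add s kv.2.1 else s)
      PySem.Set.empty
  notes_playing.foldl
    (fun one_hot note =>
      if 40 ≤ note ∧ note ≤ 88 then PySem.List.pySetD one_hot (note - 40) 1 else one_hot)
    (List.replicate 49 0)

-- ===== PORT B =====
def get_notes_in_32nd_period_alt (note_dict : List (Int × Int × (Int × Int))) (start_time : Int) (end_time : Int) : List Int :=
  (List.range 49).map (fun (i : Nat) =>
    if note_dict.any (fun kv => kv.2.1 == 40 + (i : Int) && kv.2.2.1 == start_time) then (1 : Int) else 0)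

-- ===== PRECONDITION & SPEC =====
def Spec_get_notes_in_32nd_period (note_dict : List (Int × Int × (Int × Int))) (start_time : Int) (end_time : Int) (out : List Int) : Prop := out = get_notes_in_32nd_period_alt note_dict start_time end_time
instance (note_dict : List (Int × Int × (Int × Int))) (start_time : Int) (end_time : Int) (out : List Int) : Decidable (Spec_get_notes_in_32nd_period note_dict start_time end_time out) := by unfold Spec_get_notes_in_32nd_period; infer_instance

-- ===== CLAIM (what is proved, stated in full; the proofs are below) =====
def Claim_equal_get_notes_in_32nd_period : Prop := ∀ (note_dict : List (Int × Int × (Int × Int))) (start_time : Int) (end_time : Int), Dom_get_notes_in_32nd_period note_dict start_time end_time → Spec_get_notes_in_32nd_period note_dict start_time end_time (get_notes_in_32nd_period note_dict start_time end_time)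

-- ===== LEMMAS AND PROOFS =====

-- membership in the collected set ↔ some dict value has a matching start
lemma mem_fold_set (st : Int) (l : List (Int × Int × (Int × Int))) (s : PySem.Set Int) (n : Int) :
    n ∈ l.foldl (fun s kv => if kv.2.2.1 = st then PySem.Set.add s kv.2.1 else s) s ↔
      n ∈ s ∨ ∃ kv ∈ l, kv.2.2.1 = st ∧ kv.2.1 = n := by
  induction l generalizing s with
  | nil => simp
  | cons hd tl ih =>
    simp only [List.foldl_cons, ih, List.mem_cons]
    by_cases h : hd.2.2.1 = st
    · simp [h, PySem.Set.mem_add]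
      tauto
    · simp [h]

-- the scatter loop preserves the array length
lemma fold_scatter_length (l : List Int) (acc : List Int) :
    (l.foldl (fun one_hot note =>
        if 40 ≤ note ∧ note ≤ 88 then PySem.List.pySetD one_hot (note - 40) 1 else one_hot)
      acc).length = acc.length := by
  induction l generalizing acc with
  | nil => rfl
  | cons hd tl ih =>
    simp only [List.foldl_cons]
    rw [ih]
    by_cases h : 40 ≤ hd ∧ hd ≤ 88
    · simp [h, PySem.List.length_pySetD]
    · simp [h]

-- the scatter loop, characterised index-wise
lemma fold_scatter_get? (l : List Int) (acc : List Int) (hlen : acc.length = 49)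
    (i : Nat) (hi : i < 49) :
    (l.foldl (fun one_hot note =>
        if 40 ≤ note ∧ note ≤ 88 then PySem.List.pySetD one_hot (note - 40) 1 else one_hot)
      acc)[i]? = if ∃ n ∈ l, n = 40 + (i : Int) then some 1 else acc[i]? := by
  induction l generalizing acc with
  | nil => simp
  | cons hd tl ih =>
    simp only [List.foldl_cons]
    have hstep : (if 40 ≤ hd ∧ hd ≤ 88 then PySem.List.pySetD acc (hd - 40) 1 else acc).length = 49 := by
      by_cases h : 40 ≤ hd ∧ hd ≤ 88
      · simp [h, PySem.List.length_pySetD, hlen]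
      · simp [h, hlen]
    rw [ih _ hstep]
    by_cases htl : ∃ n ∈ tl, n = 40 + (i : Int)
    · have hcons : ∃ n ∈ hd :: tl, n = 40 + (i : Int) := by
        obtain ⟨n, hn, he⟩ := htl; exact ⟨n, List.mem_cons_of_mem _ hn, he⟩
      rw [if_pos htl, if_pos hcons]
    · by_cases hhd : hd = 40 + (i : Int)
      · have hcons : ∃ n ∈ hd :: tl, n = 40 + (i : Int) := ⟨hd, List.mem_cons_self, hhd⟩
        have hrange : 40 ≤ hd ∧ hd ≤ 88 := by constructor <;> omega
        have hnn : (0 : Int) ≤ hd - 40 := by omega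
        rw [if_neg htl, if_pos hcons, if_pos hrange,
            PySem.List.pySetD_of_nonneg acc 1 hnn]
        have hk : (hd - 40).toNat = i := by omega
        rw [hk, List.getElem?_set_self (by omega)]
      · have hcons : ¬ ∃ n ∈ hd :: tl, n = 40 + (i : Int) := by
          rintro ⟨n, hn, he⟩
          rcases List.mem_cons.mp hn with h | h
          · exact hhd (h ▸ he)
          · exact htl ⟨n, h, he⟩
        rw [if_neg htl, if_neg hcons]
        by_cases hrange : 40 ≤ hd ∧ hd ≤ 88
        · have hnn : (0 : Int) ≤ hd - 40 := by omega
          rw [if_pos hrange, PySem.List.pySetD_of_nonneg acc 1 hnn,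
              List.getElem?_set_ne (by omega)]
        · rw [if_neg hrange]

-- B's output, index-wise
lemma alt_get? (note_dict : List (Int × Int × (Int × Int))) (start_time end_time : Int)
    (i : Nat) (hi : i < 49) :
    (get_notes_in_32nd_period_alt note_dict start_time end_time)[i]? =
      some (if note_dict.any (fun kv => kv.2.1 == 40 + (i : Int) && kv.2.2.1 == start_time)
            then 1 else 0) := by
  unfold get_notes_in_32nd_period_alt
  rw [List.getElem?_map, List.getElem?_range hi, Option.map_some]

lemma alt_length (note_dict : List (Int × Int × (Int × Int))) (start_time end_time : Int) :
    (get_notes_in_32nd_period_alt note_dict start_time end_time).length = 49 := by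
  unfold get_notes_in_32nd_period_alt
  simp

-- ===== VERDICT (by name: the statement is the Claim_ definition above) =====
theorem get_notes_in_32nd_period_spec : Claim_equal_get_notes_in_32nd_period := by
  intro note_dict start_time end_time _
  unfold Spec_get_notes_in_32nd_period
  apply List.ext_getElem?
  intro i
  by_cases hi : i < 49
  · rw [alt_get? note_dict start_time end_time i hi]
    unfold get_notes_in_32nd_period
    rw [fold_scatter_get? _ _ (by simp) i hi]
    have hmem : (∃ n ∈ note_dict.foldl
          (fun s kv => if kv.2.2.1 = start_time then PySem.Set.add s kv.2.1 else s)
          PySem.Set.empty, n = 40 + (i : Int)) ↔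
        note_dict.any (fun kv => kv.2.1 == 40 + (i : Int) && kv.2.2.1 == start_time) = true := by
      rw [List.any_eq_true]
      constructor
      · rintro ⟨n, hn, rfl⟩
        rcases (mem_fold_set start_time note_dict _ _).mp hn with h | ⟨kv, hkv, hst, he⟩
        · simp [PySem.Set.empty] at h
        · exact ⟨kv, hkv, by simp [he, hst]⟩
      · rintro ⟨kv, hkv, hp⟩
        simp only [Bool.and_eq_true, beq_iff_eq] at hp
        exact ⟨kv.2.1, (mem_fold_set start_time note_dict _ _).mpr
          (Or.inr ⟨kv, hkv, hp.2, rfl⟩), hp.1⟩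
    by_cases h : note_dict.any (fun kv => kv.2.1 == 40 + (i : Int) && kv.2.2.1 == start_time) = true
    · rw [if_pos (hmem.mpr h), if_pos h]
    · rw [if_neg (fun hx => h (hmem.mp hx)), if_neg h,
          List.getElem?_replicate]
      simp [hi]
  · rw [List.getElem?_eq_none, List.getElem?_eq_none]
    · rw [alt_length]; omega
    · unfold get_notes_in_32nd_period
      rw [fold_scatter_length]
      simp only [List.length_replicate]
      omega
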